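-- pv_equiv track=rewrite | github.com/mohamedbril/Aisec_Crypto_chall | baby_47/solve/solve.py | rot47
-- ===== SOURCE A (Python) =====
-- def rot47(text):
--     result = []
--     for char in text:
--         ascii_val = ord(char)
--         if 33 <= ascii_val <= 126:
--             rotated = 33 + ((ascii_val - 33 + 47) % 94)
--             result.append(chr(rotated))
--         else:
--             result.append(char)
--     return ''.join(result)
-- ===== SOURCE B (Python) =====
-- _SRC = ''.join(chr(c) for c in range(33, 127))
-- _TABLE = str.maketrans(_SRC, _SRC[47:] + _SRC[:47])
--
-- def rot47(text):
--     return text.translate(_TABLE)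
-- ===== Notes on version B (the rewrite author's own statement) =====
-- stated objective: idiomatic
-- what changed: Replaces the per-character loop with modular arithmetic by a 94-entry translation table built once with str.maketrans and a single text.translate pass; chars outside 33..126 fall through unchanged.
import Mathlib
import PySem

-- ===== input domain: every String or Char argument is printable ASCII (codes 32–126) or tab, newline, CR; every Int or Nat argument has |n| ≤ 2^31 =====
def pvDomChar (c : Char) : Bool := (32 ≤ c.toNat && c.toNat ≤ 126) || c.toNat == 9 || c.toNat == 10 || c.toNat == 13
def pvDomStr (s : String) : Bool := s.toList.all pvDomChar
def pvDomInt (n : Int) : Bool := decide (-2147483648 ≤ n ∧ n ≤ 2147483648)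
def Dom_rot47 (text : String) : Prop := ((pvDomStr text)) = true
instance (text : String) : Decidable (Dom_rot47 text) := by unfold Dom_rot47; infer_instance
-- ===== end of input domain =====

-- B replaces A's per-character modular arithmetic loop by a 94-entry translation
-- table built once and a single lookup pass (idiomatic str.maketrans/translate).

-- ===== PORT A =====
-- result is a list of the produced characters ("".join of 1-char strings = String.ofList)
def rot47 (text : String) : String :=
  String.ofList (text.toList.foldl (fun result char =>
    let asciiVal := char.toNat
    if 33 ≤ asciiVal ∧ asciiVal ≤ 126 then
      result ++ [Char.ofNat (33 + ((asciiVal - 33 + 47) % 94))]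
    else
      result ++ [char]) [])

-- ===== PORT B =====
-- _SRC = chr(33)..chr(126); _TABLE = maketrans(_SRC, _SRC[47:] + _SRC[:47])
def rot47Src : List Char := (List.range 94).map (fun i => Char.ofNat (33 + i))
def rot47Table : PySem.Dict Char Char :=
  PySem.Dict.ofList (rot47Src.zip (rot47Src.drop 47 ++ rot47Src.take 47))
-- text.translate(_TABLE): each char mapped through the table, missing chars kept
def rot47_alt (text : String) : String :=
  String.ofList (text.toList.map (fun c => rot47Table.getD c c))

-- ===== PRECONDITION & SPEC =====
def Spec_rot47 (text : String) (out : String) : Prop := out = rot47_alt text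
instance (text : String) (out : String) : Decidable (Spec_rot47 text out) := by unfold Spec_rot47; infer_instance

-- ===== CLAIM (what is proved, stated in full; the proofs are below) =====
def Claim_equal_rot47 : Prop := ∀ (text : String), Dom_rot47 text → Spec_rot47 text (rot47 text)

-- ===== LEMMAS AND PROOFS =====

set_option maxRecDepth 4000 in
lemma rot47_step_eq (c : Char) (h : pvDomChar c = true) :
    (if 33 ≤ c.toNat ∧ c.toNat ≤ 126 then
        Char.ofNat (33 + ((c.toNat - 33 + 47) % 94)) else c)
      = rot47Table.getD c c := by
  have hlt : c.toNat < 127 := by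
    simp only [pvDomChar, Bool.or_eq_true, Bool.and_eq_true, decide_eq_true_iff,
      beq_iff_eq] at h
    rcases h with ((⟨h1, h2⟩ | h) | h) | h <;> omega
  have key : ∀ n < 127,
      (if 33 ≤ (Char.ofNat n).toNat ∧ (Char.ofNat n).toNat ≤ 126 then
          Char.ofNat (33 + (((Char.ofNat n).toNat - 33 + 47) % 94)) else Char.ofNat n)
        = rot47Table.getD (Char.ofNat n) (Char.ofNat n) := by decide
  have hc : Char.ofNat c.toNat = c := Char.ofNat_toNat c
  have := key c.toNat hlt
  rwa [hc] at this

lemma rot47_fold_eq : ∀ (cs : List Char), cs.all pvDomChar = true → ∀ (acc : List Char),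
    cs.foldl (fun result char =>
      if 33 ≤ char.toNat ∧ char.toNat ≤ 126 then
        result ++ [Char.ofNat (33 + ((char.toNat - 33 + 47) % 94))]
      else
        result ++ [char]) acc
    = acc ++ cs.map (fun c => rot47Table.getD c c) := by
  intro cs
  induction cs with
  | nil => intro _ acc; simp
  | cons c cs ih =>
    intro h acc
    simp only [List.all_cons, Bool.and_eq_true] at h
    simp only [List.foldl_cons, List.map_cons]
    rw [ih h.2]
    have hstep := rot47_step_eq c h.1
    by_cases hc : 33 ≤ c.toNat ∧ c.toNat ≤ 126 <;>
      simp [hc] at hstep ⊢ <;> rw [← hstep]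

-- ===== VERDICT (by name: the statement is the Claim_ definition above) =====
theorem rot47_spec : Claim_equal_rot47 := by
  intro text hdom
  unfold Spec_rot47 rot47 rot47_alt
  rw [rot47_fold_eq text.toList hdom []]
  simp
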